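-- pv_equiv track=rewrite | github.com/changsooooooooooo/coding_test | woowa/solution.py | solution
-- ===== SOURCE A (Python) =====
-- def solution(s):
--     answer = []
--     i = 0
--     while i < len(s):
--         count = 1
--         temp_idx = 0
--         for j in range(i+1, len(s)):
--             temp_idx = j
--             if s[j] == s[i]:
--                 count += 1
--                 continue
--             break
--         answer.append(count)
--         if s[i] == s[temp_idx] and temp_idx == len(s)-1:
--             break
--         if temp_idx == len(s)-1:
--             answer.append(1)
--             break
--         i = temp_idx
--
--     if s[0] == s[-1]:
--         answer[0] += answer[-1]
--         answer = answer[:-1]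
--     answer.sort()
--     return answer
-- ===== SOURCE B (Python) =====
-- def solution(s):
--     # boundary positions where adjacent characters differ, then run lengths as successive differences
--     bounds = [i + 1 for i in range(len(s) - 1) if s[i] != s[i + 1]]
--     cuts = [0] + bounds + [len(s)]
--     runs = [b - a for a, b in zip(cuts, cuts[1:])]
--     if s[0] == s[-1]:
--         runs[0] += runs[-1]
--         runs = runs[:-1]
--     runs.sort()
--     return runs
-- ===== Notes on version B (the rewrite author's own statement) =====
-- stated objective: simpler
-- what changed: B replaces A's nested while/for index scans (with its temp_idx bookkeeping and three exit paths) by computing the boundary positions where adjacent characters differ and taking successive differences of [0]+boundaries+[len(s)] as the run lengths, then applying the same circular merge and sort.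
import Mathlib
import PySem

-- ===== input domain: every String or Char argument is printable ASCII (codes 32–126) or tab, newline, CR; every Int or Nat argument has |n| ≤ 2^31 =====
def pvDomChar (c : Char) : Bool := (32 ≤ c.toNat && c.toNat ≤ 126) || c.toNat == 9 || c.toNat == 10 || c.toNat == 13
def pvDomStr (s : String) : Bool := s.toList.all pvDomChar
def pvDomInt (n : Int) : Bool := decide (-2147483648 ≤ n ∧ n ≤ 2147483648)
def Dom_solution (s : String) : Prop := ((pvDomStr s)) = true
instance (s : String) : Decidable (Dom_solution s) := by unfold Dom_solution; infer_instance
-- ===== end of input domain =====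

-- B recomputes the run lengths from the boundary positions where adjacent characters differ
-- (an index-then-differences decomposition) instead of A's nested while/for index scans; objective: simpler.
-- Both programs raise IndexError on the empty string (s[0]); Pre_ excludes it.

-- ===== PORT A =====
-- inner 'for j in range(i+1, len(s))' loop; all indices are nonnegative and in range,
-- so List.getD is exact for Python's s[j]
def solInner (cs : List Char) (i j count temp_idx : Nat) : Nat × Nat :=
  if j < cs.length then
    if cs.getD j ' ' == cs.getD i ' ' then solInner cs i (j + 1) (count + 1) j
    else (count, j)
  else (count, temp_idx)
termination_by cs.length - j

-- outer 'while i < len(s)' loop; fuel = len(s) bounds the iterations (i strictly increases)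
def solOuter (cs : List Char) (fuel i : Nat) (answer : List Int) : List Int :=
  match fuel with
  | 0 => answer
  | fuel + 1 =>
    if i < cs.length then
      let p := solInner cs i (i + 1) 1 0
      let answer := answer ++ [(p.1 : Int)]
      if cs.getD i ' ' == cs.getD p.2 ' ' && p.2 == cs.length - 1 then answer
      else if p.2 == cs.length - 1 then answer ++ [(1 : Int)]
      else solOuter cs fuel p.2 answer
    else answer

def solution (s : String) : List Int :=
  let cs := s.toList
  let answer := solOuter cs cs.length 0 []
  -- s[-1] = s[len-1] for nonempty s; the empty string (IndexError in Python) is outside Pre_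
  let answer := if cs.getD 0 ' ' == cs.getD (cs.length - 1) ' '
    then ((answer.headD 0 + answer.getLastD 0) :: answer.tail).dropLast
    else answer
  PySem.List.sorted answer (fun x => x) false

-- ===== PORT B =====
def solution_alt (s : String) : List Int :=
  let cs := s.toList
  let n := cs.length
  -- bounds = [i+1 for i in range(len(s)-1) if s[i] != s[i+1]]  (indices in range: getD exact)
  let bounds := (List.range (n - 1)).filterMap (fun i =>
    if cs.getD i ' ' != cs.getD (i + 1) ' ' then some (i + 1) else none)
  let cuts : List Nat := [0] ++ bounds ++ [n]
  -- runs = [b - a for a, b in zip(cuts, cuts[1:])]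
  let runs : List Int := (cuts.zip (cuts.drop 1)).map (fun p => (p.2 : Int) - (p.1 : Int))
  let runs := if cs.getD 0 ' ' == cs.getD (n - 1) ' '
    then ((runs.headD 0 + runs.getLastD 0) :: runs.tail).dropLast
    else runs
  PySem.List.sorted runs (fun x => x) false

-- ===== PRECONDITION & SPEC =====
-- Both A and B raise IndexError (s[0]) on the empty string; Pre_ excludes exactly it.
def Pre_solution (s : String) : Prop := s ≠ ""
instance (s : String) : Decidable (Pre_solution s) := by unfold Pre_solution; infer_instance
def pvWitness_solution : String := "aab"

def Spec_solution (s : String) (out : List Int) : Prop := out = solution_alt s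
instance (s : String) (out : List Int) : Decidable (Spec_solution s out) := by unfold Spec_solution; infer_instance

-- ===== CLAIM (what is proved, stated in full; the proofs are below) =====
def Claim_equal_solution : Prop := ∀ (s : String), Dom_solution s → Pre_solution s → Spec_solution s (solution s)

-- ===== LEMMAS AND PROOFS =====

-- run lengths of a character list (the common mathematical value both loops compute)
def rlGo (c : Char) (k : Int) : List Char → List Int
  | [] => [k]
  | d :: t => if d == c then rlGo c (k + 1) t else k :: rlGo d 1 t

def rl : List Char → List Int
  | [] => []
  | c :: t => rlGo c 1 t

-- successive differences starting from a
def dfs (a : Nat) : List Nat → List Int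
  | [] => []
  | b :: r => ((b : Int) - (a : Int)) :: dfs b r

-- recursive form of B's boundary list
def bndR : List Char → List Nat
  | [] => []
  | [_] => []
  | c :: d :: t => (if d == c then [] else [1]) ++ (bndR (d :: t)).map (· + 1)

theorem rlGo_all (t : List Char) (c : Char) (k : Int) (h : ∀ x ∈ t, x == c) :
    rlGo c k t = [k + t.length] := by
  induction t generalizing k with
  | nil => simp [rlGo]
  | cons x r ih =>
    have hx := h x (by simp)
    simp [rlGo, hx, ih (k + 1) (fun y hy => h y (by simp [hy]))]
    ring

theorem rlGo_split (t : List Char) (c : Char) (k : Int)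
    (hm : (t.takeWhile (· == c)).length < t.length) :
    rlGo c k t = (k + (t.takeWhile (· == c)).length) ::
      rlGo (t.getD (t.takeWhile (· == c)).length ' ') 1
        (t.drop ((t.takeWhile (· == c)).length + 1)) := by
  induction t generalizing k with
  | nil => simp at hm
  | cons x r ih =>
    by_cases hx : x == c
    · simp only [List.takeWhile_cons, hx, if_true] at hm ⊢
      simp only [List.length_cons] at hm
      rw [show rlGo c k (x :: r) = rlGo c (k + 1) r by simp [rlGo, hx]]
      rw [ih (k + 1) (by omega)]
      simp
      ring_nf
    · simp only [List.takeWhile_cons, hx] at hm ⊢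
      simp [rlGo, hx]

theorem dfs_shift (l : List Nat) (a : Nat) : dfs (a + 1) (l.map (· + 1)) = dfs a l := by
  induction l generalizing a with
  | nil => rfl
  | cons b r ih => simp [dfs, ih b]

theorem solInner_spec (cs : List Char) (i j count ti : Nat) (hij : i < j) :
    solInner cs i j count ti =
      (if j + ((cs.drop j).takeWhile (· == cs.getD i ' ')).length < cs.length then
         (count + ((cs.drop j).takeWhile (· == cs.getD i ' ')).length,
          j + ((cs.drop j).takeWhile (· == cs.getD i ' ')).length)
       else if j < cs.length then
         (count + ((cs.drop j).takeWhile (· == cs.getD i ' ')).length, cs.length - 1)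
       else (count, ti)) := by
  rw [solInner]
  by_cases hj : j < cs.length
  · have hdrop : cs.drop j = cs[j] :: cs.drop (j + 1) := List.drop_eq_getElem_cons hj
    have hg : cs.getD j ' ' = cs[j] := List.getD_eq_getElem cs ' ' hj
    rw [hdrop]
    by_cases hx : cs[j] == cs.getD i ' '
    · rw [if_pos hj, if_pos (by rw [hg]; exact hx)]
      rw [solInner_spec cs i (j + 1) (count + 1) j (by omega)]
      simp only [List.takeWhile_cons, hx, if_true, List.length_cons]
      by_cases hlen : j + 1 < cs.length
      · split_ifs with h1 h2 h3 <;> simp only [Prod.mk.injEq, and_true] <;> omega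
      · have : cs.drop (j + 1) = [] := List.drop_eq_nil_of_le (by omega)
        rw [this]
        simp only [List.takeWhile_nil, List.length_nil]
        split_ifs with h1 <;> simp only [Prod.mk.injEq, true_and] <;> omega
    · rw [if_pos hj, if_neg (by rw [hg]; exact hx)]
      have ht : List.takeWhile (· == cs.getD i ' ') (cs[j] :: cs.drop (j + 1)) = [] := by
        rw [List.takeWhile_cons]; simp only [hx, if_false, Bool.false_eq_true]
      rw [ht]
      simp [hj]
  · rw [if_neg hj]
    have : cs.drop j = [] := List.drop_eq_nil_of_le (by omega)
    rw [this]
    simp only [List.takeWhile_nil, List.length_nil, Nat.add_zero]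
    rw [if_neg hj, if_neg hj]
termination_by cs.length - j

-- the element at which takeWhile stops fails the predicate
theorem tw_stop {α : Type} (p : α → Bool) (d : α) :
    ∀ (l : List α), (l.takeWhile p).length < l.length →
      ¬ p (l.getD (l.takeWhile p).length d) = true := by
  intro l
  induction l with
  | nil => intro h; simp at h
  | cons x r ih =>
    intro h
    by_cases hx : p x
    · rw [List.takeWhile_cons_of_pos hx] at h ⊢
      simp only [List.length_cons, List.getD_cons_succ]
      exact ih (by simpa using h)
    · rw [List.takeWhile_cons_of_neg hx]
      simpa using hx

-- if takeWhile consumes everything, every element satisfies the predicate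
theorem tw_all {α : Type} (p : α → Bool) (l : List α)
    (h : l.length ≤ (l.takeWhile p).length) : ∀ x ∈ l, p x := by
  have hpre := List.takeWhile_prefix (l := l) p
  have hlen : (l.takeWhile p).length = l.length :=
    le_antisymm (l.takeWhile_sublist p).length_le h
  have := hpre.eq_of_length hlen
  exact fun x hx => List.takeWhile_eq_self_iff.mp this x hx

theorem getD_drop {α : Type} (l : List α) (n k : Nat) (d : α) (h : n + k < l.length) :
    (l.drop n).getD k d = l.getD (n + k) d := by
  rw [List.getD_eq_getElem _ _ (by rw [List.length_drop]; omega),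
      List.getD_eq_getElem _ _ h]
  simp [List.getElem_drop]

theorem rlGo_succ (t : List Char) (c : Char) (k h : Int) (tl : List Int)
    (heq : rlGo c k t = h :: tl) : rlGo c (k + 1) t = (h + 1) :: tl := by
  induction t generalizing k h tl with
  | nil =>
    simp only [rlGo] at heq
    obtain ⟨rfl, rfl⟩ := by simpa using heq
    simp [rlGo]
  | cons x r ih =>
    by_cases hx : x == c
    · rw [show rlGo c k (x :: r) = rlGo c (k + 1) r by simp [rlGo, hx]] at heq
      rw [show rlGo c (k + 1) (x :: r) = rlGo c (k + 1 + 1) r by simp [rlGo, hx]]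
      exact ih (k + 1) h tl heq
    · rw [show rlGo c k (x :: r) = k :: rlGo x 1 r by simp [rlGo, hx]] at heq
      obtain ⟨rfl, rfl⟩ := by simpa using heq
      simp [rlGo, hx]

theorem solOuter_spec (cs : List Char) :
    ∀ fuel i ans, i < cs.length → cs.length ≤ i + fuel →
      (i + 1 < cs.length ∨ cs.length = 1) →
      solOuter cs fuel i ans = ans ++ rlGo (cs.getD i ' ') 1 (cs.drop (i + 1)) := by
  intro fuel
  induction fuel with
  | zero => intro i ans h1 h2 _; omega
  | succ fuel ih =>
    intro i ans h1 h2 h3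
    have hins := solInner_spec cs i (i + 1) 1 0 (by omega)
    have htlen : (cs.drop (i + 1)).length = cs.length - (i + 1) := List.length_drop ..
    have hmle : ((cs.drop (i + 1)).takeWhile (· == cs.getD i ' ')).length ≤ (cs.drop (i + 1)).length :=
      ((cs.drop (i + 1)).takeWhile_sublist _).length_le
    by_cases hC : i + 1 < cs.length
    case neg =>
      have hl1 : cs.length = 1 := by omega
      have hi0 : i = 0 := by omega
      have hdnil : cs.drop (i + 1) = [] := List.drop_eq_nil_of_le (by omega)
      have hm0 : ((cs.drop (i + 1)).takeWhile (· == cs.getD i ' ')).length = 0 := by rw [hdnil]; rfl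
      rw [if_neg (show ¬(i + 1 + ((cs.drop (i + 1)).takeWhile (· == cs.getD i ' ')).length < cs.length) by omega),
          if_neg (show ¬(i + 1 < cs.length) from hC)] at hins
      simp only [solOuter, if_pos h1, hins]
      rw [if_pos (show (cs.getD i ' ' == cs.getD 0 ' ' && ((0 : Nat) == cs.length - 1)) = true
            by subst hi0; simp [hl1])]
      rw [hdnil]
      simp [rlGo]
    case pos =>
      by_cases hA : i + 1 + ((cs.drop (i + 1)).takeWhile (· == cs.getD i ' ')).length < cs.length
      · rw [if_pos hA] at hins
        have hstop : ¬ ((cs.drop (i + 1)).getD ((cs.drop (i + 1)).takeWhile (· == cs.getD i ' ')).length ' ' == cs.getD i ' ') = true :=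
          tw_stop (· == cs.getD i ' ') ' ' (cs.drop (i + 1)) (by omega)
        have hgd : (cs.drop (i + 1)).getD ((cs.drop (i + 1)).takeWhile (· == cs.getD i ' ')).length ' ' = cs.getD (i + 1 + ((cs.drop (i + 1)).takeWhile (· == cs.getD i ' ')).length) ' ' :=
          getD_drop cs (i + 1) ((cs.drop (i + 1)).takeWhile (· == cs.getD i ' ')).length ' ' (by omega)
        have hcond : (cs.getD i ' ' == cs.getD (i + 1 + ((cs.drop (i + 1)).takeWhile (· == cs.getD i ' ')).length) ' ') = false := by
          rw [← hgd]
          cases hb : (cs.drop (i + 1)).getD ((cs.drop (i + 1)).takeWhile (· == cs.getD i ' ')).length ' ' == cs.getD i ' '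
          · rw [BEq.comm] at hb; exact hb
          · exact absurd hb hstop
        have hsplit := rlGo_split (cs.drop (i + 1)) (cs.getD i ' ') 1 (by omega)
        have hdd : (cs.drop (i + 1)).drop (((cs.drop (i + 1)).takeWhile (· == cs.getD i ' ')).length + 1) = cs.drop (i + 1 + ((cs.drop (i + 1)).takeWhile (· == cs.getD i ' ')).length + 1) := by
          rw [List.drop_drop]; ring_nf
        have hc1 : ¬((cs.getD i ' ' == cs.getD (i + 1 + ((cs.drop (i + 1)).takeWhile (· == cs.getD i ' ')).length) ' '
              && ((i + 1 + ((cs.drop (i + 1)).takeWhile (· == cs.getD i ' ')).length : Nat) == cs.length - 1)) = true) := by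
          rw [hcond]; simp
        by_cases hB : i + 1 + ((cs.drop (i + 1)).takeWhile (· == cs.getD i ' ')).length = cs.length - 1
        · simp only [solOuter, if_pos h1, hins]
          rw [if_neg hc1, if_pos (show (((i + 1 + ((cs.drop (i + 1)).takeWhile (· == cs.getD i ' ')).length : Nat) == cs.length - 1)) = true
                by simpa using hB)]
          rw [hsplit]
          have hnil : (cs.drop (i + 1)).drop (((cs.drop (i + 1)).takeWhile (· == cs.getD i ' ')).length + 1) = [] := by
            rw [hdd]; exact List.drop_eq_nil_of_le (by omega)
          rw [hnil]
          simp [rlGo]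
        · simp only [solOuter, if_pos h1, hins]
          rw [if_neg hc1, if_neg (show ¬((((i + 1 + ((cs.drop (i + 1)).takeWhile (· == cs.getD i ' ')).length : Nat) == cs.length - 1)) = true)
                by simpa using hB)]
          rw [ih (i + 1 + ((cs.drop (i + 1)).takeWhile (· == cs.getD i ' ')).length) (ans ++ [((1 + ((cs.drop (i + 1)).takeWhile (· == cs.getD i ' ')).length : Nat) : Int)]) (by omega) (by omega)
              (by omega)]
          rw [hsplit, hgd, hdd, List.append_assoc]
          simp
      · rw [if_neg (show ¬(i + 1 + ((cs.drop (i + 1)).takeWhile (· == cs.getD i ' ')).length < cs.length) from hA), if_pos hC] at hins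
        have hmeq : ((cs.drop (i + 1)).takeWhile (· == cs.getD i ' ')).length = (cs.drop (i + 1)).length := by omega
        have hall : ∀ x ∈ cs.drop (i + 1), (x == cs.getD i ' ') = true :=
          tw_all (· == cs.getD i ' ') (cs.drop (i + 1)) (by omega)
        have hlast : (cs.getD (cs.length - 1) ' ' == cs.getD i ' ') = true := by
          have h1' : cs.getD (cs.length - 1) ' '
              = (cs.drop (i + 1)).getD (cs.length - 1 - (i + 1)) ' ' := by
            rw [getD_drop cs (i + 1) (cs.length - 1 - (i + 1)) ' ' (by omega)]
            congr 1; omega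
          rw [h1']
          apply hall
          rw [List.getD_eq_getElem _ _ (by rw [List.length_drop]; omega)]
          exact List.getElem_mem _
        simp only [solOuter, if_pos h1, hins]
        rw [if_pos (show (cs.getD i ' ' == cs.getD (cs.length - 1) ' '
              && ((cs.length - 1 : Nat) == cs.length - 1)) = true
              by rw [BEq.comm] at hlast; rw [hlast]; simp)]
        rw [rlGo_all _ _ _ hall, hmeq]
        push_cast
        simp

theorem bounds_eq (cs : List Char) :
    (List.range (cs.length - 1)).filterMap (fun i =>
      if cs.getD i ' ' != cs.getD (i + 1) ' ' then some (i + 1) else none) = bndR cs := by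
  induction cs with
  | nil => rfl
  | cons c t ih =>
    match t with
    | [] => rfl
    | d :: r =>
      have hlen : (c :: d :: r : List Char).length - 1 = (d :: r : List Char).length := by simp
      rw [hlen, show ((d :: r : List Char).length) = r.length + 1 by simp,
          List.range_succ_eq_map, List.filterMap_cons]
      have hshift : List.filterMap ((fun i =>
          if (c :: d :: r : List Char).getD i ' ' != (c :: d :: r : List Char).getD (i + 1) ' '
          then some (i + 1) else none) ∘ Nat.succ) (List.range r.length) =
          (List.filterMap (fun i =>
            if (d :: r : List Char).getD i ' ' != (d :: r : List Char).getD (i + 1) ' '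
            then some (i + 1) else none) (List.range r.length)).map (· + 1) := by
        rw [List.map_filterMap]
        apply List.filterMap_congr
        intro i _
        simp only [Function.comp_apply, List.getD_cons_succ]
        split_ifs <;> rfl
      rw [List.filterMap_map, hshift]
      have ih' : List.filterMap (fun i =>
          if (d :: r : List Char).getD i ' ' != (d :: r : List Char).getD (i + 1) ' '
          then some (i + 1) else none) (List.range r.length) = bndR (d :: r) := by
        have := ih
        rwa [show (d :: r : List Char).length - 1 = r.length by simp] at this
      rw [ih']
      simp only [bndR, List.getD_cons_zero, List.getD_cons_succ]
      by_cases hdc : c = d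
      · simp [hdc]
      · simp [hdc, Ne.symm hdc]

theorem dfs_bnd (cs : List Char) (h : cs ≠ []) :
    dfs 0 (bndR cs ++ [cs.length]) = rl cs := by
  induction cs with
  | nil => exact absurd rfl h
  | cons c t ih =>
    match t with
    | [] => simp [bndR, dfs, rl, rlGo]
    | d :: r =>
      have ih' := ih (by simp)
      cases hbl : bndR (d :: r) ++ [(d :: r : List Char).length] with
      | nil => simp at hbl
      | cons b rest =>
        rw [hbl] at ih'
        by_cases hdc : d = c
        · subst hdc
          have hb1 : bndR (d :: d :: r) = (bndR (d :: r)).map (· + 1) := by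
            simp [bndR]
          rw [hb1,
              show ((d :: d :: r : List Char).length) = (d :: r : List Char).length + 1 by simp,
              show (bndR (d :: r)).map (· + 1) ++ [(d :: r : List Char).length + 1] =
                (bndR (d :: r) ++ [(d :: r : List Char).length]).map (· + 1) by simp,
              hbl, List.map_cons, dfs, dfs_shift rest b]
          have h1 : rlGo d 1 r = ((b : Int) - ((0 : Nat) : Int)) :: dfs b rest := by
            rw [show dfs 0 (b :: rest) = ((b : Int) - ((0 : Nat) : Int)) :: dfs b rest
                  from rfl] at ih'
            exact ih'.symm
          have h2 := rlGo_succ r d 1 _ _ h1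
          rw [rl, show rlGo d 1 (d :: r) = rlGo d (1 + 1) r by simp [rlGo], h2]
          congr 1
        · have hne : (d == c) = false := by
            cases hb : d == c
            · rfl
            · exact absurd (eq_of_beq hb) hdc
          have hb1 : bndR (c :: d :: r) = 1 :: (bndR (d :: r)).map (· + 1) := by
            simp [bndR, hdc]
          rw [hb1,
              show ((c :: d :: r : List Char).length) = (d :: r : List Char).length + 1 by simp]
          rw [show (1 :: (bndR (d :: r)).map (· + 1)) ++ [(d :: r : List Char).length + 1] =
                1 :: ((bndR (d :: r) ++ [(d :: r : List Char).length]).map (· + 1)) by simp]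
          rw [dfs, show (1 : Nat) = 0 + 1 from rfl, dfs_shift, hbl, ih']
          simp [rl, rlGo, hdc]

theorem zip_diff (l : List Nat) (a : Nat) :
    (((a :: l).zip l).map (fun p => (p.2 : Int) - (p.1 : Int))) = dfs a l := by
  induction l generalizing a with
  | nil => rfl
  | cons b r ih => simp [dfs, ih b]

-- ===== VERDICT (by name: the statement is the Claim_ definition above) =====
theorem solution_spec : Claim_equal_solution := by
  unfold Claim_equal_solution
  intro s _ hpre
  unfold Spec_solution
  have hne : s.toList ≠ [] := by
    intro hnil
    exact hpre (by simpa using congrArg String.ofList hnil)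
  obtain ⟨c, t, hct⟩ : ∃ c t, s.toList = c :: t := by
    cases h : s.toList with
    | nil => exact absurd h hne
    | cons c t => exact ⟨c, t, rfl⟩
  have hlen : 0 < s.toList.length := by rw [hct]; simp
  have hA' : solOuter s.toList s.toList.length 0 [] = rl s.toList := by
    rw [solOuter_spec s.toList s.toList.length 0 [] hlen (by omega)
        (by rw [hct]; simp only [List.length_cons]; omega)]
    rw [hct]
    simp [rl]
  simp only [solution, solution_alt, List.cons_append, List.drop_one,
    List.tail_cons]
  rw [zip_diff, bounds_eq]
  simp only [List.nil_append]
  rw [dfs_bnd s.toList hne, hA']
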